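-- pv_equiv track=rewrite | github.com/teemollt/aps | legacy/queue1/2차원배열 bfs.py | sol
-- ===== SOURCE A (Python) =====
-- def sol(x):
--     # 맨뒤로 보낸 숫자가 0보다 작아지면 반복 종료 그 숫자는 0으로
--     while x[-1] > 0:
--         # 1사이클 돌기
--         for i in range(1, 6):
--             # 반복 돌면서 리스트의 마지막이 0이하면 0으로 만들고 break해주기
--             if x[-1] <= 0:
--                 x[-1] = 0
--                 break
--             # 아니면 사이클 계속 돌자
--             else:
--                 # 0번째 pop해주고 i만큼 빼주고 append
--                 x.append(x.pop(0) - i)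
--     x[-1] = 0
--     return x
-- ===== SOURCE B (Python) =====
-- # B: single loop over a fixed array with modular indices (no pop(0)/append churn,
-- # no nested for/break); O(steps) instead of O(steps*n). Mutates x in place like A.
-- def sol(x):
--     n = len(x)
--     v = x[:]                     # v[j] = current value of original slot j
--     t = 0                        # steps done; queue is slots t%n, ..., (t+n-1)%n
--     while v[(t + n - 1) % n] > 0:
--         v[t % n] -= t % 5 + 1
--         t += 1
--     v[(t + n - 1) % n] = 0
--     x[:] = [v[(t + j) % n] for j in range(n)]
--     return x
-- ===== Notes on version B (the rewrite author's own statement) =====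
-- stated objective: alternative
-- what changed: A simulates the queue by nested while/for with pop(0)/append mutations; B runs one flat loop over a fixed array addressed with modular indices (step counter t gives both the slot t%n and the subtrahend t%5+1) and rebuilds the queue once at the end.
-- outside the precondition, e.g. on sol([]): A raises IndexError, B raises ZeroDivisionError
import Mathlib
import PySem

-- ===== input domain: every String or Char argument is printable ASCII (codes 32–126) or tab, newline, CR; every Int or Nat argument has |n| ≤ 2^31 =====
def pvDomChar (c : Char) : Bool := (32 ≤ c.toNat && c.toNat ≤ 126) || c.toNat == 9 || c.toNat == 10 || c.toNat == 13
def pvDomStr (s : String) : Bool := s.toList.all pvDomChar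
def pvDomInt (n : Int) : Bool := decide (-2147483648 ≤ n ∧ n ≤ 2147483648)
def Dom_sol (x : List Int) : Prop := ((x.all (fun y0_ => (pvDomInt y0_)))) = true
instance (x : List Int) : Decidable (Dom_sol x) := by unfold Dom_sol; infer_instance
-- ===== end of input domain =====

-- B replaces A's rotating-queue simulation (pop(0)/append each step, nested for with break)
-- by a single loop over a fixed array with modular indices; equivalence is about the return
-- value (both A and B also mutate the argument list in place, A via pop/append, B via x[:] = …).

-- ===== PORT A =====
-- x[-1] = v  (Python raises IndexError on []; that input is outside Pre_)
def solSetLast (l : List Int) (v : Int) : List Int :=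
  match l with
  | [] => []
  | _ :: _ => l.dropLast ++ [v]

-- the for-loop 'for i in range(1, 6)' with its break, r = remaining iterations
def solForA (x : List Int) (i : Nat) : Nat → List Int
  | 0 => x
  | r + 1 =>
    match PySem.List.pyGet? x (-1) with
    | none => x          -- IndexError (empty list): outside Pre_
    | some last =>
      if last ≤ 0 then solSetLast x 0
      else
        match PySem.List.pop? x 0 with
        | none => x      -- unreachable: x nonempty here
        | some (h, rest) => solForA (rest ++ [h - (i : Int)]) (i + 1) r

-- the while loop; fuel is a totality guard only (the bound below is never exhausted on Pre_:
-- every queue step lowers the sum of positive parts, so at most (sum)+1 steps ever run)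
def solWhileA (x : List Int) : Nat → List Int
  | 0 => x
  | f + 1 =>
    match PySem.List.pyGet? x (-1) with
    | none => x          -- IndexError (empty list): outside Pre_
    | some last => if last > 0 then solWhileA (solForA x 1 5) f else x

def solFuel (x : List Int) : Nat := (x.map Int.toNat).sum + 2

def sol (x : List Int) : List Int :=
  solSetLast (solWhileA x (solFuel x)) 0

-- ===== PORT B =====
-- the while loop of Source B: state (v, t); fuel is a totality guard only (same bound, 5 checks per cycle)
def solWhileB (v : List Int) (n t : Nat) : Nat → List Int × Nat
  | 0 => (v, t)
  | f + 1 =>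
    if v.getD ((t + n - 1) % n) 0 > 0 then
      solWhileB (v.set (t % n) (v.getD (t % n) 0 - ((t % 5 : Nat) + 1))) n (t + 1) f
    else (v, t)

-- the two lines after Source B's loop: zero the last queue slot, rebuild the queue
def solFinish (p : List Int × Nat) (n : Nat) : List Int :=
  let v := p.1.set ((p.2 + n - 1) % n) 0
  (List.range n).map (fun j => v.getD ((p.2 + j) % n) 0)

def sol_alt (x : List Int) : List Int :=
  let n := x.length
  solFinish (solWhileB x n 0 (5 * solFuel x)) n

-- ===== PRECONDITION & SPEC =====
-- Pre_ excludes only the empty list, on which Python A raises IndexError (x[-1]).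
def Pre_sol (x : List Int) : Prop := x ≠ []
instance (x : List Int) : Decidable (Pre_sol x) := by unfold Pre_sol; infer_instance
def pvWitness_sol : List Int := [3, 1, 4]

def Spec_sol (x : List Int) (out : List Int) : Prop := out = sol_alt x
instance (x : List Int) (out : List Int) : Decidable (Spec_sol x out) := by unfold Spec_sol; infer_instance

-- ===== CLAIM (what is proved, stated in full; the proofs are below) =====
def Claim_equal_sol : Prop := ∀ (x : List Int), Dom_sol x → Pre_sol x → Spec_sol x (sol x)

-- ===== LEMMAS AND PROOFS =====

-- the queue A holds after t steps, reconstructed from B's state (v, t)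
def solRot (v : List Int) (t : Nat) : List Int :=
  (List.range v.length).map (fun j => v.getD ((t + j) % v.length) 0)

theorem length_solRot (v : List Int) (t : Nat) : (solRot v t).length = v.length := by
  simp [solRot]

theorem getElem_solRot (v : List Int) (t j : Nat) (h : j < (solRot v t).length) :
    (solRot v t)[j] = v.getD ((t + j) % v.length) 0 := by
  simp [solRot] at h ⊢

theorem solRot_ne_nil (v : List Int) (t : Nat) (hn : 0 < v.length) : solRot v t ≠ [] := by
  intro h; have := length_solRot v t; rw [h] at this; simp at this; omega

theorem pyGet_last_solRot (v : List Int) (t : Nat) (hn : 0 < v.length) :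
    PySem.List.pyGet? (solRot v t) (-1) = some (v.getD ((t + v.length - 1) % v.length) 0) := by
  rw [PySem.List.pyGet?_neg_one, List.getLast?_eq_getElem?]
  have h : (solRot v t).length - 1 < (solRot v t).length := by rw [length_solRot]; omega
  rw [List.getElem?_eq_getElem h, getElem_solRot]
  have : t + (v.length - 1) = t + v.length - 1 := by omega
  rw [length_solRot, this]

theorem add_mod_ne (t n a b : Nat) (hab : a < b) (hb : b - a < n) :
    (t + b) % n ≠ (t + a) % n := by
  intro h
  have h' : Nat.ModEq n (t + a) (t + b) := h.symm
  have hd := (Nat.modEq_iff_dvd' (by omega)).mp h'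
  have he : t + b - (t + a) = b - a := by omega
  rw [he] at hd
  have := Nat.le_of_dvd (by omega) hd
  omega

theorem getD_set_ne (v : List Int) (p q : Nat) (a : Int) (h : q ≠ p) :
    (v.set p a).getD q 0 = v.getD q 0 := by
  simp [List.getD_eq_getElem?_getD, h.symm]

theorem getD_set_self (v : List Int) (p : Nat) (a : Int) (h : p < v.length) :
    (v.set p a).getD p 0 = a := by
  simp [List.getD_eq_getElem?_getD, h]

theorem solRot_zero (v : List Int) : solRot v 0 = v := by
  apply List.ext_getElem (by simp [length_solRot])
  intro i h1 h2
  rw [getElem_solRot]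
  rw [Nat.zero_add, Nat.mod_eq_of_lt h2, List.getD_eq_getElem?_getD, List.getElem?_eq_getElem h2]
  rfl

theorem rot_step (v : List Int) (t : Nat) (c : Int) (hn : 0 < v.length) :
    (solRot v t).tail ++ [v.getD (t % v.length) 0 - c]
      = solRot (v.set (t % v.length) (v.getD (t % v.length) 0 - c)) (t + 1) := by
  have hlen : (solRot v t).length = v.length := length_solRot v t
  apply List.ext_getElem (by simp [length_solRot, List.length_tail, hlen]; omega)
  intro i h1 h2
  have hi : i < v.length := by simpa [length_solRot] using h2
  rw [getElem_solRot, List.length_set]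
  by_cases hc : i < v.length - 1
  · rw [List.getElem_append_left (by simp [List.length_tail, hlen]; omega)]
    rw [List.getElem_tail]
    rw [getElem_solRot]
    have hne : (t + 1 + i) % v.length ≠ t % v.length := by
      have e1 : t + 1 + i = t + (1 + i) := by omega
      have e2 : t = t + 0 := by omega
      rw [e1]; conv_rhs => rw [e2]
      exact add_mod_ne t v.length 0 (1 + i) (by omega) (by omega)
    rw [getD_set_ne _ _ _ _ hne]
    congr 2
    omega
  · have hie : i = v.length - 1 := by omega
    rw [List.getElem_append_right (by simp [List.length_tail, hlen]; omega)]
    have e3 : t + 1 + i = t + v.length := by omega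
    rw [e3, Nat.add_mod_right, getD_set_self _ _ _ (Nat.mod_lt _ hn)]
    simp [List.length_tail, hlen, hie]

theorem solSetLast_eq (l : List Int) (v : Int) (h : l ≠ []) :
    solSetLast l v = l.dropLast ++ [v] := by
  cases l with
  | nil => exact absurd rfl h
  | cons a l => rfl

theorem setLast_solRot (v : List Int) (t : Nat) (hn : 0 < v.length) :
    solSetLast (solRot v t) 0 = solRot (v.set ((t + v.length - 1) % v.length) 0) t := by
  have hq : solRot v t ≠ [] := solRot_ne_nil v t hn
  rw [solSetLast_eq _ _ hq]
  have hlen : (solRot v t).length = v.length := length_solRot v t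
  have e0 : t + v.length - 1 = t + (v.length - 1) := by omega
  apply List.ext_getElem (by simp [length_solRot, hlen]; omega)
  intro i h1 h2
  have hi : i < v.length := by simpa [length_solRot] using h2
  rw [getElem_solRot, List.length_set]
  by_cases hc : i < v.length - 1
  · rw [List.getElem_append_left (by simp [hlen]; omega), List.getElem_dropLast, getElem_solRot]
    rw [e0, getD_set_ne _ _ _ _ (Ne.symm (add_mod_ne t v.length i (v.length - 1) (by omega) (by omega)))]
  · have hie : i = v.length - 1 := by omega
    rw [List.getElem_append_right (by simp [hlen]; omega)]
    subst hie
    rw [e0, getD_set_self _ _ _ (Nat.mod_lt _ hn)]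
    simp [hlen]

theorem setLast_idem (y : List Int) (hy : y ≠ []) :
    solSetLast (solSetLast y 0) 0 = solSetLast y 0 := by
  rw [solSetLast_eq _ _ hy, solSetLast_eq _ _ (by simp), List.dropLast_concat]

theorem whileA_stop (y : List Int) (a : Int) (f : Nat)
    (h : PySem.List.pyGet? y (-1) = some a) (ha : a ≤ 0) : solWhileA y f = y := by
  cases f with
  | zero => rfl
  | succ f => simp [solWhileA, h]; omega

theorem length_whileB (v : List Int) (n t f : Nat) :
    (solWhileB v n t f).1.length = v.length := by
  induction f generalizing v t with
  | zero => rfl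
  | succ f ih =>
    simp only [solWhileB]
    split
    · rw [ih]; simp
    · rfl

-- the inner lemma: one for-cycle of A against up to 5 fuel-steps of B
theorem inner_cycle (f : Nat)
    (IH : ∀ (v : List Int) (t : Nat), 0 < v.length → t % 5 = 0 →
      solSetLast (solWhileA (solRot v t) f) 0
        = solSetLast (solRot (solWhileB v v.length t (5 * f)).1 (solWhileB v v.length t (5 * f)).2) 0) :
    ∀ (r : Nat), r ≤ 5 → ∀ (v : List Int) (t : Nat), 0 < v.length → t % 5 = (5 - r) % 5 →
      solSetLast (solWhileA (solForA (solRot v t) (6 - r) r) f) 0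
        = solSetLast (solRot (solWhileB v v.length t (5 * f + r)).1
            (solWhileB v v.length t (5 * f + r)).2) 0 := by
  intro r
  induction r generalizing f with
  | zero =>
    intro _ v t hn ht
    simp only [solForA, Nat.add_zero]
    exact IH v t hn (by omega)
  | succ r ih =>
    intro hr5 v t hn ht
    have hr4 : r ≤ 4 := by omega
    have ht' : t % 5 = 4 - r := by omega
    have hq := solRot_ne_nil v t hn
    simp only [solForA, pyGet_last_solRot v t hn]
    have hB : 5 * f + (r + 1) = (5 * f + r) + 1 := by omega
    rw [hB]
    simp only [solWhileB]
    by_cases hg : v.getD ((t + v.length - 1) % v.length) 0 ≤ 0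
    · rw [if_pos hg, if_neg (by omega)]
      rw [whileA_stop _ 0 f (by rw [solSetLast_eq _ _ hq]; exact PySem.List.pyGet?_neg_one_append_singleton _ _) le_rfl]
      rw [setLast_idem _ hq]
    · rw [if_neg hg, if_pos (by omega)]
      obtain ⟨a, l, hql⟩ : ∃ a l, solRot v t = a :: l := by
        cases h : solRot v t with
        | nil => exact absurd h hq
        | cons a l => exact ⟨a, l, rfl⟩
      have ha : a = v.getD (t % v.length) 0 := by
        have h0 : (0:Nat) < (solRot v t).length := by rw [length_solRot]; omega
        have h1 : (solRot v t)[0]? = some (v.getD ((t + 0) % v.length) 0) := by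
          rw [List.getElem?_eq_getElem h0, getElem_solRot]
        rw [hql] at h1
        simpa using h1
      simp only [hql, PySem.List.pop?_zero_cons]
      have hc : ((6 - (r + 1) : Nat) : Int) = ((t % 5 : Nat) : Int) + 1 := by
        have : (6 - (r + 1) : Nat) = (t % 5) + 1 := by omega
        rw [this]; push_cast; ring
      have hstep : l ++ [a - ((6 - (r + 1) : Nat) : Int)]
          = solRot (v.set (t % v.length) (v.getD (t % v.length) 0 - ((t % 5 : Nat) + 1))) (t + 1) := by
        rw [hc, ha, ← rot_step v t _ hn, hql]
        simp
      have hi : (6 - (r + 1) : Nat) + 1 = 6 - r := by omega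
      rw [hstep, hi]
      have hlen' : 0 < (v.set (t % v.length) (v.getD (t % v.length) 0 - ((t % 5 : Nat) + 1))).length := by
        rw [List.length_set]; omega
      have := ih f IH (by omega) _ (t + 1) hlen' (by omega)
      rw [List.length_set] at this
      exact this

theorem main_loop (f : Nat) : ∀ (v : List Int) (t : Nat), 0 < v.length → t % 5 = 0 →
    solSetLast (solWhileA (solRot v t) f) 0
      = solSetLast (solRot (solWhileB v v.length t (5 * f)).1 (solWhileB v v.length t (5 * f)).2) 0 := by
  induction f with
  | zero =>
    intro v t hn ht
    simp only [solWhileA, solWhileB]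
  | succ f ihf =>
    intro v t hn ht
    simp only [solWhileA, pyGet_last_solRot v t hn]
    by_cases hg : v.getD ((t + v.length - 1) % v.length) 0 > 0
    · rw [if_pos hg]
      have h5 : 5 * (f + 1) = 5 * f + 5 := by omega
      rw [h5]
      exact inner_cycle f ihf 5 le_rfl v t hn (by omega)
    · rw [if_neg hg]
      have h5 : 5 * (f + 1) = (5 * f + 4) + 1 := by omega
      rw [h5]
      simp only [solWhileB]
      rw [if_neg hg]

-- ===== VERDICT (by name: the statement is the Claim_ definition above) =====
theorem sol_spec : Claim_equal_sol := by
  intro x _ hpre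
  have hn : 0 < x.length := List.length_pos_iff.mpr hpre
  unfold Spec_sol sol sol_alt
  have h0 : x = solRot x 0 := (solRot_zero x).symm
  calc solSetLast (solWhileA x (solFuel x)) 0
      = solSetLast (solWhileA (solRot x 0) (solFuel x)) 0 := by rw [← h0]
    _ = solSetLast (solRot (solWhileB x x.length 0 (5 * solFuel x)).1
          (solWhileB x x.length 0 (5 * solFuel x)).2) 0 := main_loop _ x 0 hn rfl
    _ = solFinish (solWhileB x x.length 0 (5 * solFuel x)) x.length := by
          rw [setLast_solRot _ _ (by rw [length_whileB]; exact hn)]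
          simp [solFinish, solRot, length_whileB]
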